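-- pv_equiv track=rewrite | github.com/morry-k/AutoDismantle_auction | backend/services/parser.py | explode_stacked_row
-- ===== SOURCE A (Python) =====
-- from typing import Any, Dict, List, Optional, Tuple
--
-- def explode_stacked_row(row: List[str]) -> List[List[str]]:
--     split_cols: List[List[str]] = [(c or "").splitlines() for c in row]
--     max_len = max((len(p) for p in split_cols), default=1)
--     if max_len <= 1:
--         return [row]
--     out: List[List[str]] = []
--     for i in range(max_len):
--         out.append([(p[i].strip() if i < len(p) else "") for p in split_cols])
--     return out
-- ===== SOURCE B (Python) =====
-- from typing import List
--
-- def explode_stacked_row(row: List[str]) -> List[List[str]]: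
--     split_cols = [(c or "").splitlines() for c in row]
--     if all(len(p) <= 1 for p in split_cols):
--         return [row]
--     out: List[List[str]] = []
--     while any(split_cols):
--         out.append([(p.pop(0).strip() if p else "") for p in split_cols])
--     return out
-- ===== Notes on version B (the rewrite author's own statement) =====
-- stated objective: alternative
-- what changed: Replaces the index-based double loop over range(max_len) with bounds checks by a column-consuming transpose: while any column still has lines, emit a row of popped-and-stripped heads, padding exhausted columns with ''.
import Mathlib
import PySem

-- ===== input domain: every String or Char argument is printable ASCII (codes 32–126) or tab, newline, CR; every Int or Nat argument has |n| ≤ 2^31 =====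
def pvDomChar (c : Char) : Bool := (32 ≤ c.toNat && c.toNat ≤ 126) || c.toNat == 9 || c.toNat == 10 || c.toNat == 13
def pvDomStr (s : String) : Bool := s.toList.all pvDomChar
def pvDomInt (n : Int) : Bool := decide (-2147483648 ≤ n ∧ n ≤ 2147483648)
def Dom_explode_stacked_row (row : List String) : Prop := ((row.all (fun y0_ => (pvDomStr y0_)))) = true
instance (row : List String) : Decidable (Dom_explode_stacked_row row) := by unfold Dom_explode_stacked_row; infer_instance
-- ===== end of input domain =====

-- B replaces A's index-based double loop by a column-consuming transpose (pop heads while any column is nonempty); same cost, different traversal.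

-- ===== PORT A =====
def explode_stacked_row (row : List String) : List (List String) :=
  let split_cols := row.map (fun c => PySem.Str.splitlines (if c == "" then "" else c))
  let max_len : Int := (PySem.List.max? (split_cols.map (fun p => (p.length : Int))) (fun x => x)).getD 1
  if max_len ≤ 1 then [row]
  else (PySem.List.pyRange 0 max_len 1).map (fun i =>
    split_cols.map (fun p => if i < (p.length : Int) then PySem.Str.strip (PySem.List.pyGetD p i "") else ""))

-- ===== PORT B =====
-- termination helper for the while-loop: popping the head of each nonempty column shrinks the total size
theorem pvTailsSumLt (cols : List (List String)) (h : cols.any (fun p => !p.isEmpty) = true) :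
    ((cols.map List.tail).map List.length).sum < (cols.map List.length).sum := by
  induction cols with
  | nil => simp at h
  | cons c t ih =>
    have hle : ∀ (u : List (List String)), ((u.map List.tail).map List.length).sum ≤ (u.map List.length).sum := by
      intro u
      induction u with
      | nil => simp
      | cons a b ihb =>
        simp only [List.map_cons, List.sum_cons]
        have : a.tail.length ≤ a.length := by cases a <;> simp
        omega
    simp only [List.any_cons, Bool.or_eq_true] at h
    simp only [List.map_cons, List.sum_cons]
    rcases h with h | h
    · have : c ≠ [] := by cases c <;> simp_all
      have hc : c.tail.length < c.length := by cases c <;> simp_all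
      have := hle t
      omega
    · have := ih h
      have hc : c.tail.length ≤ c.length := by cases c <;> simp
      omega

def pvAltLoop (cols : List (List String)) : List (List String) :=
  if h : cols.any (fun p => !p.isEmpty) = true then
    (cols.map (fun p => match p with | [] => "" | hd :: _ => PySem.Str.strip hd)) :: pvAltLoop (cols.map List.tail)
  else []
termination_by (cols.map List.length).sum
decreasing_by simp only [List.map_subtype, List.unattach_attach]; exact pvTailsSumLt cols h

def explode_stacked_row_alt (row : List String) : List (List String) :=
  let split_cols := row.map (fun c => PySem.Str.splitlines (if c == "" then "" else c))
  if split_cols.all (fun p => p.length ≤ 1) then [row]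
  else pvAltLoop split_cols

-- ===== PRECONDITION & SPEC =====
def Spec_explode_stacked_row (row : List String) (out : List (List String)) : Prop := out = explode_stacked_row_alt row
instance (row : List String) (out : List (List String)) : Decidable (Spec_explode_stacked_row row out) := by unfold Spec_explode_stacked_row; infer_instance

-- ===== CLAIM (what is proved, stated in full; the proofs are below) =====
def Claim_equal_explode_stacked_row : Prop := ∀ (row : List String), Dom_explode_stacked_row row → Spec_explode_stacked_row row (explode_stacked_row row)

-- ===== LEMMAS AND PROOFS =====

/-- the cell A computes at row `i`, column `p` (Nat form) -/
def pvG (i : Nat) (p : List String) : String :=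
  if i < p.length then PySem.Str.strip (p.getD i "") else ""

/-- running max of a list of Nats -/
def pvF (ls : List Nat) : Nat := ls.foldr max 0

theorem pvFoldr_swap (ls : List Nat) (a : Nat) : ls.foldr max a = max a (pvF ls) := by
  induction ls with
  | nil => simp [pvF]
  | cons x t ih => simp only [List.foldr, pvF] at *; omega

theorem pvF_all_le_one (ls : List Nat) : ls.all (fun n => n ≤ 1) = true ↔ pvF ls ≤ 1 := by
  induction ls with
  | nil => simp [pvF]
  | cons a t ih =>
    simp only [List.all_cons, Bool.and_eq_true, decide_eq_true_eq, pvF, List.foldr] at *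
    constructor
    · rintro ⟨h1, h2⟩
      have := ih.mp h2
      omega
    · intro h
      have h1 : a ≤ 1 := le_trans (le_max_left _ _) h
      have h2 := ih.mpr (le_trans (le_max_right _ _) h)
      exact ⟨h1, h2⟩

theorem pvF_tails (cols : List (List String)) :
    pvF ((cols.map List.tail).map List.length) = pvF (cols.map List.length) - 1 := by
  induction cols with
  | nil => simp [pvF]
  | cons c t ih =>
    simp only [List.map_cons, pvF, List.foldr] at *
    have hc : c.tail.length = c.length - 1 := by cases c <;> simp
    omega

theorem pvAny_iff (cols : List (List String)) :
    cols.any (fun p => !p.isEmpty) = true ↔ pvF (cols.map List.length) ≠ 0 := by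
  induction cols with
  | nil => simp [pvF]
  | cons c t ih =>
    simp only [List.any_cons, Bool.or_eq_true, List.map_cons, pvF, List.foldr] at *
    cases c <;> simp_all

theorem pvG_succ (i : Nat) (p : List String) : pvG (i + 1) p = pvG i p.tail := by
  cases p <;> simp [pvG]

theorem pvG_zero (p : List String) :
    (match p with | [] => "" | hd :: _ => PySem.Str.strip hd) = pvG 0 p := by
  cases p <;> simp [pvG]

theorem pvAltLoop_eq (M : Nat) : ∀ (cols : List (List String)),
    pvF (cols.map List.length) = M →
    pvAltLoop cols = (List.range M).map (fun i => cols.map (pvG i)) := by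
  induction M with
  | zero =>
    intro cols hM
    rw [pvAltLoop.eq_def]
    have : ¬ (cols.any (fun p => !p.isEmpty) = true) := by
      rw [pvAny_iff]; omega
    simp [this]
  | succ M ih =>
    intro cols hM
    rw [pvAltLoop.eq_def]
    have hany : cols.any (fun p => !p.isEmpty) = true := by
      rw [pvAny_iff]; omega
    rw [dif_pos hany]
    have htails : pvF ((cols.map List.tail).map List.length) = M := by
      rw [pvF_tails]; omega
    rw [ih _ htails, List.range_succ_eq_map]
    simp only [List.map_cons, List.map_map]
    congr 1
    · exact List.map_congr_left (fun p _ => pvG_zero p)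
    · apply List.map_congr_left
      intro i _
      simp only [Function.comp]
      exact List.map_congr_left (fun p _ => (pvG_succ i p).symm)

theorem pvMaxInt (ls : List Nat) : ∀ (a : Nat),
    (ls.map (fun n : Nat => (n : Int))).foldl max ((a : Nat) : Int) = ((ls.foldr max a : Nat) : Int) := by
  induction ls with
  | nil => intro a; simp
  | cons x t ih =>
    intro a
    simp only [List.map_cons, List.foldl_cons, List.foldr_cons]
    have h1 : (max ((a : Nat) : Int) ((x : Nat) : Int)) = ((max a x : Nat) : Int) := by omega
    rw [h1, ih (max a x)]
    have h2 : t.foldr max (max a x) = max x (t.foldr max a) := by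
      rw [pvFoldr_swap, pvFoldr_swap]; omega
    rw [h2]

/-- A's max_len expression equals the running max of the column lengths when the row is nonempty -/
theorem pvMaxLen_eq (cols : List (List String)) (h : cols ≠ []) :
    (PySem.List.max? (cols.map (fun p => (p.length : Int))) (fun x => x)).getD 1
      = ((pvF (cols.map List.length) : Nat) : Int) := by
  cases cols with
  | nil => simp at h
  | cons c t =>
    simp only [List.map_cons]
    rw [PySem.List.max?_id_cons]
    simp only [Option.getD_some]
    have hmm : List.map (fun p : List String => ((p.length : Nat) : Int)) t
        = (t.map List.length).map (fun n : Nat => (n : Int)) := by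
      simp [List.map_map, Function.comp]
    rw [hmm, pvMaxInt (t.map List.length) c.length]
    have h2 : (t.map List.length).foldr max c.length
        = pvF ((c :: t).map List.length) := by
      simp only [List.map_cons, pvF, List.foldr]
      rw [pvFoldr_swap]
      rfl
    rw [h2]
    simp [pvF]

-- ===== VERDICT (by name: the statement is the Claim_ definition above) =====
theorem explode_stacked_row_spec : Claim_equal_explode_stacked_row := by
  intro row _
  unfold Spec_explode_stacked_row
  simp only [explode_stacked_row, explode_stacked_row_alt]
  set cols := row.map (fun c => PySem.Str.splitlines (if c == "" then "" else c)) with hcols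
  by_cases hnil : cols = []
  · have hrow : row = [] := by
      rcases row with _ | ⟨r, rs⟩
      · rfl
      · simp [hcols] at hnil
    subst hrow
    rfl
  · rw [pvMaxLen_eq cols hnil]
    set M := pvF (cols.map List.length) with hM
    by_cases hle : M ≤ 1
    · rw [if_pos (by exact_mod_cast hle), if_pos (by simpa using (pvF_all_le_one _).mpr hle)]
    · rw [if_neg (by exact_mod_cast hle),
        if_neg (by simp only [List.all_eq_true, decide_eq_true_eq] at *
                   intro hall
                   exact hle ((pvF_all_le_one (cols.map List.length)).mp
                     (by simp only [List.all_eq_true, decide_eq_true_eq, List.mem_map]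
                         rintro _ ⟨p, hp, rfl⟩; exact hall p hp)))]
      rw [pvAltLoop_eq M cols rfl, PySem.List.pyRange_one]
      simp only [Int.sub_zero, Int.toNat_natCast, List.map_map]
      apply List.map_congr_left
      intro i _
      simp only [Function.comp, Int.zero_add]
      apply List.map_congr_left
      intro p _
      simp [pvG, PySem.List.pyGetD_natCast, Nat.cast_lt]
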